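-- pv_equiv track=rewrite | github.com/mathbeveridge/asm | aztec/build_half_coin.py | push_triangle_south
-- ===== SOURCE A (Python) =====
-- def push_triangle_south(triangle):
--     size = len(triangle)
--     out = []
--     for i in range(size):
--         row = []
--         for j in range(i+1):
--             row.append(triangle[i-j][j])
--         #out.append(row)
--         out.insert(0,row)
--
--     return out
-- ===== SOURCE B (Python) =====
-- def push_triangle_south(triangle):
--     size = len(triangle)
--     out = [[] for _ in range(size)]
--     for c in range(size):
--         for k in range(size - c):
--             out[k].append(triangle[size - 1 - k - c][c])
--     return out
-- ===== Notes on version B (the rewrite author's own statement) =====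
-- stated objective: alternative
-- what changed: B preallocates the result rows and scatters the triangle column-major (for each source column c it appends one element to every output row), replacing A's per-output-row gather with insert-at-front.
import Mathlib
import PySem

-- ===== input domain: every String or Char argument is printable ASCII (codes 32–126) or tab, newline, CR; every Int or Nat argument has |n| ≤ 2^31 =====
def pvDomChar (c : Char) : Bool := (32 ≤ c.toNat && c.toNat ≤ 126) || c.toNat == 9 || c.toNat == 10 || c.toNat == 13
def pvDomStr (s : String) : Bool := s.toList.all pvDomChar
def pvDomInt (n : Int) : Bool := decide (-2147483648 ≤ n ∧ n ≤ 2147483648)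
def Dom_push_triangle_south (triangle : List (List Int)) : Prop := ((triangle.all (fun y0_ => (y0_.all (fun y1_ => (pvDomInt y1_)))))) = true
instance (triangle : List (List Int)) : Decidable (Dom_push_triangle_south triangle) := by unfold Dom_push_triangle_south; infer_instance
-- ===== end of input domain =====

-- B rearranges the triangle by a column-major scatter into preallocated rows instead of
-- A's per-output-row gather with insert-at-front; same cost, different decomposition.

-- ===== PORT A =====
-- out.insert(0,row) is transliterated as `row :: out`; triangle[i-j][j] via pyGetD
-- (exact on Pre_, where every index is in range).
def push_triangle_south (triangle : List (List Int)) : List (List Int) :=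
  let size := triangle.length
  (List.range size).foldl (fun out (i : Nat) =>
    ((List.range (i + 1)).foldl (fun row (j : Nat) =>
      row ++ [PySem.List.pyGetD (PySem.List.pyGetD triangle ((i : Int) - (j : Int)) []) (j : Int) 0]) [])
    :: out) []

-- ===== PORT B =====
-- out[k].append(x) is transliterated as pySetD out k (pyGetD out k [] ++ [x]).
def push_triangle_south_alt (triangle : List (List Int)) : List (List Int) :=
  let size := triangle.length
  let out0 : List (List Int) := (List.range size).map (fun _ => [])
  (List.range size).foldl (fun out c =>
    (List.range (size - c)).foldl (fun out (k : Nat) =>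
      PySem.List.pySetD out (k : Int)
        (PySem.List.pyGetD out (k : Int) [] ++
          [PySem.List.pyGetD (PySem.List.pyGetD triangle ((size : Int) - 1 - (k : Int) - (c : Int)) []) (c : Int) 0]))
      out) out0

-- ===== PRECONDITION & SPEC =====
-- Pre_ excludes ragged triangles (some row r shorter than size - r), on which the Python A
-- raises IndexError (and B raises too).
def Pre_push_triangle_south (triangle : List (List Int)) : Prop :=
  ∀ r < triangle.length, triangle.length - r ≤ (triangle.getD r []).length
instance (triangle : List (List Int)) : Decidable (Pre_push_triangle_south triangle) := by
  unfold Pre_push_triangle_south; infer_instance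

def pvWitness_push_triangle_south : List (List Int) := [[1, 2], [3]]

def Spec_push_triangle_south (triangle : List (List Int)) (out : List (List Int)) : Prop := out = push_triangle_south_alt triangle
instance (triangle : List (List Int)) (out : List (List Int)) : Decidable (Spec_push_triangle_south triangle out) := by unfold Spec_push_triangle_south; infer_instance

-- ===== CLAIM (what is proved, stated in full; the proofs are below) =====
def Claim_equal_push_triangle_south : Prop := ∀ (triangle : List (List Int)), Dom_push_triangle_south triangle → Pre_push_triangle_south triangle → Spec_push_triangle_south triangle (push_triangle_south triangle)

-- ===== LEMMAS AND PROOFS =====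

-- the element scattered / gathered; both ports reduce to this
def pvG (triangle : List (List Int)) (r c : Nat) : Int := (triangle.getD r []).getD c 0

-- the common normal form: row k of the output, columns 0 .. size-k-1
def pvSpecRow (triangle : List (List Int)) (size k : Nat) : List Int :=
  (List.range (size - k)).map (fun c => pvG triangle (size - 1 - k - c) c)

theorem pv_foldl_append (h : Nat → Int) : ∀ (n : Nat) (acc : List Int),
    (List.range n).foldl (fun row (j : Nat) => row ++ [h j]) acc = acc ++ (List.range n).map h := by
  intro n
  induction n with
  | zero => simp
  | succ n ih => intro acc; simp [List.range_succ, ih]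

theorem pv_foldl_cons (f : Nat → List Int) : ∀ (n : Nat) (acc : List (List Int)),
    (List.range n).foldl (fun out (i : Nat) => f i :: out) acc = ((List.range n).map f).reverse ++ acc := by
  intro n
  induction n with
  | zero => simp
  | succ n ih => intro acc; simp [List.range_succ, ih]

theorem pv_reverse_map_range (f : Nat → List Int) (n : Nat) :
    ((List.range n).map f).reverse = (List.range n).map (fun k => f (n - 1 - k)) := by
  apply List.ext_getElem
  · simp
  · intro k hk hk'
    simp [List.getElem_reverse, List.getElem_map, List.getElem_range]

-- Port A equals the normal form
theorem pvA_eq (triangle : List (List Int)) :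
    push_triangle_south triangle
      = (List.range triangle.length).map (pvSpecRow triangle triangle.length) := by
  unfold push_triangle_south
  rw [pv_foldl_cons, List.append_nil, pv_reverse_map_range]
  apply List.map_congr_left
  intro k hk
  rw [List.mem_range] at hk
  unfold pvSpecRow
  rw [pv_foldl_append, List.nil_append]
  have hrange : triangle.length - 1 - k + 1 = triangle.length - k := by omega
  rw [hrange]
  apply List.map_congr_left
  intro j hj
  rw [List.mem_range] at hj
  have hij : ((triangle.length - 1 - k : Nat) : Int) - (j : Nat)
      = ((triangle.length - 1 - k - j : Nat) : Int) := by omega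
  rw [hij, PySem.List.pyGetD_natCast, PySem.List.pyGetD_natCast]
  rfl

theorem pv_foldl_set_length (h : Nat → Int) : ∀ (l : List Nat) (o : List (List Int)),
    (l.foldl (fun o k => o.set k (o.getD k [] ++ [h k])) o).length = o.length := by
  intro l
  induction l with
  | nil => intro o; rfl
  | cons a l ih => intro o; rw [List.foldl_cons, ih, List.length_set]

-- the inner loop of B: result characterized pointwise by getD
theorem pvB_inner (h : Nat → Int) : ∀ (n : Nat) (o : List (List Int)), n ≤ o.length →
    ∀ k, ((List.range n).foldl (fun o k => o.set k (o.getD k [] ++ [h k])) o).getD k []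
        = if k < n then o.getD k [] ++ [h k] else o.getD k [] := by
  intro n
  induction n with
  | zero => intro o _ k; simp
  | succ n ih =>
    intro o hn k
    rw [List.range_succ, List.foldl_append, List.foldl_cons, List.foldl_nil]
    have hmidlen : ((List.range n).foldl (fun o k => o.set k (o.getD k [] ++ [h k])) o).length
        = o.length := pv_foldl_set_length h _ o
    by_cases hk : k = n
    · subst hk
      rw [List.getD_eq_getElem?_getD, List.getElem?_set_self (by rw [hmidlen]; omega),
        Option.getD_some, ih o (by omega) k, if_neg (by omega), if_pos (by omega)]
    · rw [List.getD_eq_getElem?_getD, List.getElem?_set_ne (by omega), ← List.getD_eq_getElem?_getD,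
        ih o (by omega) k]
      by_cases h1 : k < n
      · rw [if_pos h1, if_pos (by omega)]
      · rw [if_neg h1, if_neg (by omega)]

-- B's outer loop invariant: after c columns, row k holds its first min c (size-k) entries
theorem pvB_outer (triangle : List (List Int)) :
    ∀ (c : Nat), c ≤ triangle.length →
    ((List.range c).foldl (fun out c =>
      (List.range (triangle.length - c)).foldl (fun out (k : Nat) =>
        PySem.List.pySetD out (k : Int)
          (PySem.List.pyGetD out (k : Int) [] ++
            [PySem.List.pyGetD (PySem.List.pyGetD triangle ((triangle.length : Int) - 1 - (k : Int) - (c : Int)) []) (c : Int) 0]))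
        out) ((List.range triangle.length).map (fun _ => []))).length = triangle.length ∧
    ∀ k, ((List.range c).foldl (fun out c =>
      (List.range (triangle.length - c)).foldl (fun out (k : Nat) =>
        PySem.List.pySetD out (k : Int)
          (PySem.List.pyGetD out (k : Int) [] ++
            [PySem.List.pyGetD (PySem.List.pyGetD triangle ((triangle.length : Int) - 1 - (k : Int) - (c : Int)) []) (c : Int) 0]))
        out) ((List.range triangle.length).map (fun _ => []))).getD k []
      = (List.range (min c (triangle.length - k))).map (fun c' => pvG triangle (triangle.length - 1 - k - c') c') := by
  intro c
  induction c with
  | zero =>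
    intro _
    constructor
    · simp
    · intro k; simp [List.getD_eq_getElem?_getD]
  | succ c ih =>
    intro hc
    obtain ⟨ihlen, ihget⟩ := ih (by omega)
    rw [List.range_succ, List.foldl_append, List.foldl_cons, List.foldl_nil]
    simp only [PySem.List.pySetD_natCast, PySem.List.pyGetD_natCast] at ihlen ihget ⊢
    set mid := (List.range c).foldl _ ((List.range triangle.length).map (fun _ => [])) with hmid
    set h : Nat → Int := fun k =>
      (PySem.List.pyGetD triangle ((triangle.length : Int) - 1 - (k : Int) - (c : Int)) []).getD c 0 with hh
    have hget := pvB_inner h (triangle.length - c) mid (by omega)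
    constructor
    · rw [pv_foldl_set_length h _ mid]; exact ihlen
    · intro k
      rw [hget k, ihget k]
      by_cases hk : k < triangle.length - c
      · -- row k gains entry c
        have hmin1 : min c (triangle.length - k) = c := by omega
        have hmin2 : min (c + 1) (triangle.length - k) = c + 1 := by omega
        rw [if_pos hk, hmin1, hmin2, List.range_succ, List.map_append]
        simp only [List.map_cons, List.map_nil]
        congr 2
        have hcast : (triangle.length : Int) - 1 - (k : Int) - (c : Int)
            = ((triangle.length - 1 - k - c : Nat) : Int) := by omega
        rw [hh]
        simp only
        rw [hcast, PySem.List.pyGetD_natCast]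
        rfl
      · have hmin : min c (triangle.length - k) = min (c + 1) (triangle.length - k) := by omega
        rw [if_neg hk, hmin]

theorem pvB_eq (triangle : List (List Int)) :
    push_triangle_south_alt triangle
      = (List.range triangle.length).map (pvSpecRow triangle triangle.length) := by
  have halt : push_triangle_south_alt triangle
      = (List.range triangle.length).foldl (fun out c =>
      (List.range (triangle.length - c)).foldl (fun out (k : Nat) =>
        PySem.List.pySetD out (k : Int)
          (PySem.List.pyGetD out (k : Int) [] ++
            [PySem.List.pyGetD (PySem.List.pyGetD triangle ((triangle.length : Int) - 1 - (k : Int) - (c : Int)) []) (c : Int) 0]))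
        out) ((List.range triangle.length).map (fun _ => [])) := rfl
  obtain ⟨hlen, hget⟩ := pvB_outer triangle triangle.length (le_refl _)
  rw [halt]
  apply List.ext_getElem
  · rw [hlen]; simp
  · intro k hk hk'
    have hk2 : k < triangle.length := by rw [hlen] at hk; exact hk
    have hrow := hget k
    rw [List.getD_eq_getElem?_getD, List.getElem?_eq_getElem hk, Option.getD_some] at hrow
    rw [hrow, List.getElem_map, List.getElem_range]
    unfold pvSpecRow
    have hmin : min triangle.length (triangle.length - k) = triangle.length - k := by omega
    rw [hmin]

-- ===== VERDICT (by name: the statement is the Claim_ definition above) =====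
theorem push_triangle_south_spec : Claim_equal_push_triangle_south := by
  intro triangle _ _
  unfold Spec_push_triangle_south
  rw [pvA_eq triangle, pvB_eq triangle]
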